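-- pv_equiv track=rewrite | github.com/shafinsiddique/algorithms-datastructures | leetcode/arrays.py | k_difference
-- ===== SOURCE A (Python) =====
-- def k_difference(l, k):
--     dict = {}
--
--     for items in l:
--         dict[items] = None
--
--     counter = 0
--     for items in l:
--         if items + k in dict:
--             counter += 1
--
--     return counter
-- ===== SOURCE B (Python) =====
-- def k_difference(l, k):
--     s = sorted(l)
--
--     def found(t):
--         lo, hi = 0, len(s)
--         while lo < hi:
--             mid = (lo + hi) // 2
--             if s[mid] == t:
--                 return True
--             if s[mid] < t:
--                 lo = mid + 1
--             else:
--                 hi = mid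
--         return False
--
--     count = 0
--     for x in l:
--         if found(x + k):
--             count += 1
--     return count
-- ===== Notes on version B (the rewrite author's own statement) =====
-- stated objective: alternative
-- what changed: Drops the dict entirely: B sorts the list once and decides the membership test x+k in l by hand-written binary search over the sorted copy, a sort-plus-search algorithm instead of A's hash-set presence table.
import Mathlib
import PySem

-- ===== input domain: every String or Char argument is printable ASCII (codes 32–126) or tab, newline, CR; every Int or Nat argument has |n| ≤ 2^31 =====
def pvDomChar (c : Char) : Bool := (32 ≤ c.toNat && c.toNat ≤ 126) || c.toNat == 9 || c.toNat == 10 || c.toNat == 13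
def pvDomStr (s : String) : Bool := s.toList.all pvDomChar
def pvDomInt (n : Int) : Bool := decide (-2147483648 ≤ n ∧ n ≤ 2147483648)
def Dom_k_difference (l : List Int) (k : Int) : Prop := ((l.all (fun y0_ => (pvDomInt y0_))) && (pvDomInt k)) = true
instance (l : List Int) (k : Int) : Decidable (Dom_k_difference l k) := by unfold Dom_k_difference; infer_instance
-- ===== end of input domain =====

-- B drops the dict: it sorts the list once and answers 'x+k in l' by binary search over the sorted copy (sort-and-search instead of a hash presence table; same result).

-- ===== PORT A =====
def k_difference (l : List Int) (k : Int) : Int :=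
  let dict : PySem.Dict Int (Option Int) :=
    l.foldl (fun d x => d.insert x none) PySem.Dict.empty
  l.foldl (fun c x => if dict.contains (x + k) then c + 1 else c) 0

-- ===== PORT B =====
-- Source B's while-loop 'found' as recursion on hi - lo; s[mid] is always in range, ported as getD.
def bsearch (s : List Int) (t : Int) (lo hi : Nat) : Bool :=
  if _h : lo < hi then
    let mid := (lo + hi) / 2
    let v := s.getD mid 0
    if v = t then true
    else if v < t then bsearch s t (mid + 1) hi
    else bsearch s t lo mid
  else false
termination_by hi - lo
decreasing_by all_goals omega

def k_difference_alt (l : List Int) (k : Int) : Int :=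
  let s := PySem.List.sorted l (fun x => x) false
  l.foldl (fun c x => if bsearch s (x + k) 0 s.length then c + 1 else c) 0

-- ===== PRECONDITION & SPEC =====
def Spec_k_difference (l : List Int) (k : Int) (out : Int) : Prop := out = k_difference_alt l k
instance (l : List Int) (k : Int) (out : Int) : Decidable (Spec_k_difference l k out) := by unfold Spec_k_difference; infer_instance

-- ===== CLAIM (what is proved, stated in full; the proofs are below) =====
def Claim_equal_k_difference : Prop := ∀ (l : List Int) (k : Int), Dom_k_difference l k → Spec_k_difference l k (k_difference l k)

-- ===== LEMMAS AND PROOFS =====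

-- A's presence dict contains y iff y occurred in l (generalized over the initial dict).
theorem presence_contains (l : List Int) (d : PySem.Dict Int (Option Int)) (y : Int) :
    (l.foldl (fun d x => d.insert x none) d).contains y = (d.contains y || decide (y ∈ l)) := by
  induction l generalizing d with
  | nil => simp
  | cons a t ih =>
      simp only [List.foldl_cons, ih, PySem.Dict.contains_insert, List.mem_cons]
      by_cases h : y = a
      · simp [h]
      · have hb : (y == a) = false := by simp [h]
        simp [hb, h]

-- monotonicity of a ≤-sorted list at positions read through getD
theorem getD_mono (s : List Int) (hs : s.Pairwise (· ≤ ·)) (i j : Nat)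
    (hij : i ≤ j) (hj : j < s.length) : s.getD i 0 ≤ s.getD j 0 := by
  rcases Nat.lt_or_ge i j with h | h
  · rw [List.getD_eq_getElem s 0 (Nat.lt_of_le_of_lt hij hj), List.getD_eq_getElem s 0 hj]
    exact (List.pairwise_iff_getElem.mp hs) i j _ hj h
  · have : i = j := Nat.le_antisymm hij h
    subst this; rfl

-- binary search on a sorted list decides membership, given the interval invariants
theorem bsearch_correct (s : List Int) (t : Int) (hs : s.Pairwise (· ≤ ·)) :
    ∀ (n lo hi : Nat), hi - lo ≤ n → hi ≤ s.length →
    (∀ i, i < lo → i < s.length → s.getD i 0 < t) →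
    (∀ i, hi ≤ i → i < s.length → t < s.getD i 0) →
    bsearch s t lo hi = decide (t ∈ s) := by
  intro n
  induction n with
  | zero =>
      intro lo hi hn hlen hlow hhigh
      have hle : hi ≤ lo := by omega
      rw [bsearch]
      have : ¬ lo < hi := by omega
      simp only [this, dif_neg, not_false_iff]
      symm; simp only [decide_eq_false_iff_not]
      intro hmem
      obtain ⟨i, hi', hieq⟩ := List.mem_iff_getElem.mp hmem
      have hD : s.getD i 0 = t := by rw [List.getD_eq_getElem s 0 hi', hieq]
      rcases Nat.lt_or_ge i lo with h | h
      · exact absurd hD (ne_of_lt (hlow i h hi'))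
      · exact absurd hD (ne_of_gt (hhigh i (by omega) hi'))
  | succ n ih =>
      intro lo hi hn hlen hlow hhigh
      rw [bsearch]
      by_cases hlt : lo < hi
      · simp only [hlt, dif_pos]
        have hmidlt : (lo + hi) / 2 < s.length := by omega
        by_cases he : s.getD ((lo + hi) / 2) 0 = t
        · simp only [he, if_pos]
          symm; simp only [decide_eq_true_eq]
          rw [List.getD_eq_getElem s 0 hmidlt] at he
          exact he ▸ List.getElem_mem hmidlt
        · simp only [he, if_neg, not_false_iff]
          by_cases hv : s.getD ((lo + hi) / 2) 0 < t
          · simp only [hv, if_pos]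
            refine ih ((lo + hi) / 2 + 1) hi (by omega) hlen ?_ hhigh
            intro i hi' hilen
            exact lt_of_le_of_lt (getD_mono s hs i ((lo + hi) / 2) (by omega) hmidlt) hv
          · simp only [hv, if_neg, not_false_iff]
            refine ih lo ((lo + hi) / 2) (by omega) (by omega) hlow ?_
            intro i hi' hilen
            have h1 : t < s.getD ((lo + hi) / 2) 0 := lt_of_le_of_ne (le_of_not_gt hv) (Ne.symm he)
            exact lt_of_lt_of_le h1 (getD_mono s hs ((lo + hi) / 2) i hi' hilen)
      · simp only [hlt, dif_neg, not_false_iff]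
        symm; simp only [decide_eq_false_iff_not]
        intro hmem
        obtain ⟨i, hi', hieq⟩ := List.mem_iff_getElem.mp hmem
        have hD : s.getD i 0 = t := by rw [List.getD_eq_getElem s 0 hi', hieq]
        rcases Nat.lt_or_ge i lo with h | h
        · exact absurd hD (ne_of_lt (hlow i h hi'))
        · exact absurd hD (ne_of_gt (hhigh i (by omega) hi'))

-- full-range binary search over sorted l decides membership in l
theorem bsearch_mem (l : List Int) (t : Int) :
    bsearch (PySem.List.sorted l (fun x => x) false) t 0
      (PySem.List.sorted l (fun x => x) false).length = decide (t ∈ l) := by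
  set s := PySem.List.sorted l (fun x => x) false with hsdef
  have hs : s.Pairwise (· ≤ ·) := PySem.List.sorted_pairwise l (fun x => x)
  have := bsearch_correct s t hs s.length 0 s.length (by omega) (le_refl _)
    (fun i h _ => absurd h (Nat.not_lt_zero i))
    (fun i h h' => absurd h' (by omega))
  rw [this]
  simp [hsdef, PySem.List.mem_sorted]

-- ===== VERDICT (by name: the statement is the Claim_ definition above) =====
theorem k_difference_spec : Claim_equal_k_difference := by
  intro l k _
  unfold Spec_k_difference k_difference k_difference_alt
  simp only []
  have eA : (fun (c : Int) (x : Int) =>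
      if (l.foldl (fun d x => d.insert x (none : Option Int)) PySem.Dict.empty).contains (x + k)
      then c + 1 else c)
      = (fun (c : Int) (x : Int) => if decide ((x + k) ∈ l) then c + 1 else c) := by
    funext c x
    rw [presence_contains]
    simp
  have eB : (fun (c : Int) (x : Int) =>
      if bsearch (PySem.List.sorted l (fun x => x) false) (x + k) 0
          (PySem.List.sorted l (fun x => x) false).length
      then c + 1 else c)
      = (fun (c : Int) (x : Int) => if decide ((x + k) ∈ l) then c + 1 else c) := by
    funext c x
    rw [bsearch_mem]
  rw [eA, eB]
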